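-- pv_equiv track=rewrite | github.com/JoyalPeter/GeekForGeeksPOTD | Nov 10/MyApproach.py | printMinNumberForPattern
-- ===== SOURCE A (Python) =====
-- def printMinNumberForPattern(S):
--     if S == "I":
--         return "12"
--     elif S == "D":
--         return "21"
--     else:
--         minNum = [
--             i + 1 for i in range(len(S) + 1)
--         ]  # if n is the length of string s, then the largest digit in answer will be n+1
--         i = 0
--         while i < (len(minNum) - 1):
--             if S[i] == "I":
--                 if minNum[i] > minNum[i + 1]:
--                     minNum[i], minNum[i + 1] = minNum[i + 1], minNum[i]
--                     if i:  # if i=0, no need to reduce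
--                         i -= 1  # to check if the swapping affects the previous position
--                 else:
--                     i += 1
--             else:
--                 if minNum[i] < minNum[i + 1]:
--                     minNum[i], minNum[i + 1] = minNum[i + 1], minNum[i]
--                     if i:
--                         i -= 1
--                 else:
--                     i += 1
--         minNum = [str(i) for i in minNum]
--         return "".join(minNum)
--
-- S="IDIDI"
-- ===== SOURCE B (Python) =====
-- def printMinNumberForPattern(S):
--     out = []
--     block = []
--     for i in range(len(S) + 1):
--         block.append(str(i + 1))
--         if i == len(S) or S[i] == "I":
--             out.extend(reversed(block))
--             block = []
--     return "".join(out)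
-- ===== Notes on version B (the rewrite author's own statement) =====
-- stated objective: faster
-- what changed: Replaced A's backtracking adjacent-swap loop over an index array (gnome-sort style, re-scanning left after each swap) by a single left-to-right pass that collects each run of digits ending at an 'I' (or at the end) and emits it reversed.
import Mathlib
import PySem

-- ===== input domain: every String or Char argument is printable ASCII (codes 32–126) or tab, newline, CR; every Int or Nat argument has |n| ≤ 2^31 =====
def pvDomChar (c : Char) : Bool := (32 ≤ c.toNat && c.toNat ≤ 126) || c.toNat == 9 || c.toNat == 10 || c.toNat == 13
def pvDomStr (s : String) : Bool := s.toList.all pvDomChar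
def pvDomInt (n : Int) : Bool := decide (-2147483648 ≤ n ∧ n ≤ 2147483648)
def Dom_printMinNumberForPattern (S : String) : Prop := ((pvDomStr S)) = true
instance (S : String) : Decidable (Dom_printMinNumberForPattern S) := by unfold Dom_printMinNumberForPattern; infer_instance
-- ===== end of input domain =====

-- B replaces A's quadratic backtracking adjacent-swap loop by a single linear pass
-- that emits each block of consecutive numbers reversed at every 'I' (or at the end).


-- ===== PORT A =====
-- A's while-loop: index i moves forward, swaps out-of-pattern neighbours and steps
-- back after a swap ("if i: i -= 1" is Nat subtraction i-1).  The fuel argument is a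
-- totality guard only; the proof shows (n+2)*(2n+4) steps always suffice.
-- S[i] is read with getD: the loop guard i < len(minNum)-1 keeps i in range of S.
def pvLoopA (cs : List Char) : Nat → List Int → Nat → List Int
  | 0, a, _ => a
  | fuel+1, a, i =>
    if i < a.length - 1 then
      if cs.getD i ' ' = 'I' then
        if a.getD (i+1) 0 < a.getD i 0 then
          pvLoopA cs fuel ((a.set i (a.getD (i+1) 0)).set (i+1) (a.getD i 0)) (i-1)
        else pvLoopA cs fuel a (i+1)
      else
        if a.getD i 0 < a.getD (i+1) 0 then
          pvLoopA cs fuel ((a.set i (a.getD (i+1) 0)).set (i+1) (a.getD i 0)) (i-1)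
        else pvLoopA cs fuel a (i+1)
    else a

def printMinNumberForPattern (S : String) : String :=
  if S = "I" then "12"
  else if S = "D" then "21"
  else
    let cs := S.toList
    let n := cs.length
    let minNum : List Int := (List.range (n+1)).map (fun i => ((i + 1 : Nat) : Int))
    PySem.Str.join "" ((pvLoopA cs ((n+2)*(2*n+4)) minNum 0).map PySem.Int.toStr)

-- ===== PORT B =====
-- one pass: append str(i+1) to the current block; flush the block reversed at the
-- end of the string or when S[i] == 'I'
def pvStepB (cs : List Char) (st : List String × List String) (i : Nat) :
    List String × List String :=
  let block := st.2 ++ [PySem.Int.toStr ((i : Int) + 1)]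
  if i = cs.length ∨ cs.getD i ' ' = 'I' then (st.1 ++ block.reverse, []) else (st.1, block)

def printMinNumberForPattern_alt (S : String) : String :=
  let cs := S.toList
  PySem.Str.join "" ((List.range (cs.length + 1)).foldl (pvStepB cs) ([], [])).1

-- ===== PRECONDITION & SPEC =====
def Spec_printMinNumberForPattern (S : String) (out : String) : Prop := out = printMinNumberForPattern_alt S
instance (S : String) (out : String) : Decidable (Spec_printMinNumberForPattern S out) := by unfold Spec_printMinNumberForPattern; infer_instance

-- ===== CLAIM (what is proved, stated in full; the proofs are below) =====
def Claim_equal_printMinNumberForPattern : Prop := ∀ (S : String), Dom_printMinNumberForPattern S → Spec_printMinNumberForPattern S (printMinNumberForPattern S)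

-- ===== LEMMAS AND PROOFS =====

-- integer version of B's fold state
def pvStepI (cs : List Char) (st : List Int × List Int) (i : Nat) : List Int × List Int :=
  let block := st.2 ++ [(i : Int) + 1]
  if i = cs.length ∨ cs.getD i ' ' = 'I' then (st.1 ++ block.reverse, []) else (st.1, block)

-- (settled output, current ascending block) after A has consumed the first m pattern chars
def pvOutBlk (cs : List Char) : Nat → List Int × List Int
  | 0 => ([], [1])
  | m+1 =>
    let ob := pvOutBlk cs m
    if cs.getD m ' ' = 'I' then (ob.1 ++ ob.2.reverse, [(m : Int) + 2])
    else (ob.1, ob.2 ++ [(m : Int) + 2])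

def pvFlat (st : List Int × List Int) : List Int := st.1 ++ st.2.reverse

def pvMapPair (st : List Int × List Int) : List String × List String :=
  (st.1.map PySem.Int.toStr, st.2.map PySem.Int.toStr)

def pvTail (cs : List Char) (m : Nat) : List Int :=
  (List.range (cs.length - m)).map (fun j => ((m + 2 + j : Nat) : Int))

lemma pvStepB_map (cs : List Char) (st : List Int × List Int) (i : Nat) :
    pvStepB cs (pvMapPair st) i = pvMapPair (pvStepI cs st i) := by
  simp only [pvStepB, pvStepI, pvMapPair]
  split_ifs <;> simp

lemma pvFoldB_map (cs : List Char) (l : List Nat) (st : List Int × List Int) :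
    l.foldl (pvStepB cs) (pvMapPair st) = pvMapPair (l.foldl (pvStepI cs) st) := by
  induction l generalizing st with
  | nil => rfl
  | cons x xs ih => simp only [List.foldl_cons, pvStepB_map]; exact ih _

lemma pvFoldI_eq (cs : List Char) (m : Nat) (hm : m ≤ cs.length) :
    (List.range (m+1)).foldl (pvStepI cs) ([], []) =
      if m = cs.length ∨ cs.getD m ' ' = 'I' then (pvFlat (pvOutBlk cs m), [])
      else pvOutBlk cs m := by
  induction m with
  | zero =>
    have h1 : List.range 1 = [0] := rfl
    simp only [h1, List.foldl_cons, List.foldl_nil, pvStepI, pvOutBlk, pvFlat]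
    by_cases h : 0 = cs.length ∨ cs.getD 0 ' ' = 'I' <;> simp [h]
  | succ m ih =>
    rw [List.range_succ, List.foldl_append, ih (by omega), List.foldl_cons, List.foldl_nil]
    have hmlt : m ≠ cs.length := by omega
    by_cases hI : cs.getD m ' ' = 'I'
    · simp only [hmlt, hI, or_true, if_true, pvStepI, pvOutBlk, pvFlat]
      split_ifs <;> simp [hI] <;> push_cast <;> ring_nf
    · simp only [hmlt, hI, or_false, if_false, pvStepI, pvOutBlk, pvFlat]
      split_ifs <;> simp [hI] <;> push_cast <;> ring_nf

-- B's port computes the canonical block decomposition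
lemma pvAltEq (S : String) :
    printMinNumberForPattern_alt S =
      PySem.Str.join "" ((pvFlat (pvOutBlk S.toList S.toList.length)).map PySem.Int.toStr) := by
  have h := pvFoldI_eq S.toList S.toList.length le_rfl
  simp only [true_or, if_pos, eq_self_iff_true] at h
  show PySem.Str.join "" ((List.range (S.toList.length + 1)).foldl (pvStepB S.toList) ([], [])).1 = _
  rw [show (([],[]) : List String × List String) = pvMapPair ([],[]) from rfl, pvFoldB_map, h]
  rfl

-- invariants of the block decomposition
lemma pvInv (cs : List Char) (m : Nat) :
    (pvOutBlk cs m).1.length + (pvOutBlk cs m).2.length = m + 1 ∧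
    (pvOutBlk cs m).2 = (List.range (pvOutBlk cs m).2.length).map
        (fun j => (((pvOutBlk cs m).1.length + 1 + j : Nat) : Int)) ∧
    1 ≤ (pvOutBlk cs m).2.length ∧
    (∀ x ∈ (pvOutBlk cs m).1, x < (m : Int) + 2) ∧
    (∀ j, (pvOutBlk cs m).1.length ≤ j → j < m → cs.getD j ' ' ≠ 'I') ∧
    (1 ≤ (pvOutBlk cs m).1.length → cs.getD ((pvOutBlk cs m).1.length - 1) ' ' = 'I') := by
  induction m with
  | zero =>
    refine ⟨rfl, by simp [pvOutBlk], by simp [pvOutBlk], ?_, ?_, ?_⟩ <;> simp [pvOutBlk]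
  | succ m ih =>
    obtain ⟨h1, h2, h3, h4, h5, h6⟩ := ih
    have e0 : pvOutBlk cs (m+1) = (if cs.getD m ' ' = 'I'
        then ((pvOutBlk cs m).1 ++ (pvOutBlk cs m).2.reverse, [(m:Int)+2])
        else ((pvOutBlk cs m).1, (pvOutBlk cs m).2 ++ [(m:Int)+2])) := rfl
    by_cases hI : cs.getD m ' ' = 'I'
    · rw [e0, if_pos hI]
      refine ⟨by simp; omega, by simp; push_cast; omega, by simp, ?_, ?_, ?_⟩
      · intro x hx
        simp only [List.mem_append, List.mem_reverse] at hx
        rcases hx with hx | hx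
        · have := h4 x hx; omega
        · rw [h2] at hx
          simp only [List.mem_map, List.mem_range] at hx
          obtain ⟨j, hj, rfl⟩ := hx
          have : (pvOutBlk cs m).1.length + 1 + j ≤ m + 1 := by omega
          push_cast; omega
      · intro j hj hj2
        simp only [List.length_append, List.length_reverse] at hj
        omega
      · intro _
        simp only [List.length_append, List.length_reverse, h1]
        simpa using hI
    · rw [e0, if_neg hI]
      refine ⟨by simp; omega, ?_, by simp, ?_, ?_, by simpa using h6⟩
      · simp only [List.length_append, List.length_cons, List.length_nil]
        rw [List.range_succ, List.map_append, ← h2]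
        simp only [List.map_cons, List.map_nil]
        have : (pvOutBlk cs m).1.length + 1 + (pvOutBlk cs m).2.length = m + 2 := by omega
        rw [this]; push_cast; ring_nf
      · intro x hx
        have := h4 x hx; simpa using by omega
      · intro j hj hjm
        rcases Nat.lt_or_ge j m with h | h
        · exact h5 j hj h
        · have : j = m := by omega
          simpa [this] using hI

lemma pvLoopA_succ (cs : List Char) (fuel : Nat) (a : List Int) (i : Nat) :
    pvLoopA cs (fuel+1) a i =
      if i < a.length - 1 then
        if cs.getD i ' ' = 'I' then
          if a.getD (i+1) 0 < a.getD i 0 then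
            pvLoopA cs fuel ((a.set i (a.getD (i+1) 0)).set (i+1) (a.getD i 0)) (i-1)
          else pvLoopA cs fuel a (i+1)
        else
          if a.getD i 0 < a.getD (i+1) 0 then
            pvLoopA cs fuel ((a.set i (a.getD (i+1) 0)).set (i+1) (a.getD i 0)) (i-1)
          else pvLoopA cs fuel a (i+1)
      else a := rfl

lemma pvLoopA_done (cs : List Char) (fuel : Nat) (a : List Int) (i : Nat)
    (h : ¬ i < a.length - 1) : pvLoopA cs fuel a i = a := by
  cases fuel with
  | zero => rfl
  | succ f => rw [pvLoopA_succ, if_neg h]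

lemma pvGetD_mid (l t : List Int) (z d : Int) : (l ++ z :: t).getD l.length d = z := by
  induction l with
  | nil => rfl
  | cons h l ih => simpa using ih

lemma pvGetD_mid1 (l t : List Int) (z w d : Int) :
    (l ++ z :: w :: t).getD (l.length + 1) d = w := by
  have := pvGetD_mid (l ++ [z]) t w d
  simpa using this

lemma pvGetD_left (l t : List Int) (j : Nat) (d : Int) (h : j < l.length) :
    (l ++ t).getD j d = l.getD j d := by
  simp [List.getD, List.getElem?_append_left h]

lemma pvSwap (l t : List Int) (u v a b : Int) :
    (((l ++ u :: v :: t).set l.length a).set (l.length + 1) b) = l ++ a :: b :: t := by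
  induction l with
  | nil => rfl
  | cons h l ih => simpa using ih

-- forward phase: k satisfied positions advance i by k without touching the array
lemma pvForward (cs : List Char) (a : List Int) :
    ∀ (k i f : Nat), i + k ≤ a.length - 1 →
    (∀ j, i ≤ j → j < i + k →
      if cs.getD j ' ' = 'I' then ¬ (a.getD (j+1) 0 < a.getD j 0)
      else ¬ (a.getD j 0 < a.getD (j+1) 0)) →
    pvLoopA cs (k + f) a i = pvLoopA cs f a (i + k) := by
  intro k
  induction k with
  | zero => intro i f _ _; simp
  | succ k ih =>
    intro i f hlen hsat
    have hfuel : k + 1 + f = (k + f) + 1 := by omega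
    rw [hfuel, pvLoopA_succ, if_pos (by omega)]
    have hi := hsat i (le_refl i) (by omega)
    by_cases hc : cs.getD i ' ' = 'I'
    · rw [if_pos hc] at hi
      rw [if_pos hc, if_neg hi]
      have := ih (i+1) f (by omega) (fun j hj hj2 => hsat j (by omega) (by omega))
      rw [this]; congr 1; omega
    · rw [if_neg hc] at hi
      rw [if_neg hc, if_neg hi]
      have := ih (i+1) f (by omega) (fun j hj hj2 => hsat j (by omega) (by omega))
      rw [this]; congr 1; omega

-- bubbling phase: x sinks left through the block, one swap per fuel unit
lemma pvBubble (cs : List Char) (x : Int) :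
    ∀ (d : List Int) (o r : List Int) (f : Nat),
    (∀ y ∈ d, y < x) →
    (∀ j, o.length ≤ j → j < o.length + d.length → cs.getD j ' ' ≠ 'I') →
    pvLoopA cs (d.length + f) (o ++ d ++ x :: r) (o.length + d.length - 1)
      = pvLoopA cs f (o ++ x :: (d ++ r)) (o.length - 1) := by
  intro d
  induction d using List.reverseRecOn with
  | nil => intro o r f _ _; simp
  | append_singleton d' z ih =>
    intro o r f hy hc
    have hlen : (d' ++ [z]).length = d'.length + 1 := by simp
    rw [hlen]
    have harr : o ++ (d' ++ [z]) ++ x :: r = (o ++ d') ++ z :: x :: r := by simp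
    have hfuel : d'.length + 1 + f = (d'.length + f) + 1 := by omega
    rw [harr, hfuel, pvLoopA_succ]
    have hi : o.length + (d'.length + 1) - 1 = (o ++ d').length := by simp
    rw [hi]
    rw [if_pos (show (o ++ d').length < ((o ++ d') ++ z :: x :: r).length - 1 by
      simp only [List.length_append, List.length_cons]; omega)]
    have hcz : ¬ cs.getD (o ++ d').length ' ' = 'I' := by
      have := hc (o ++ d').length (by simp) (by simp)
      simpa using this
    rw [if_neg hcz]
    rw [pvGetD_mid (o ++ d') (x :: r) z 0, pvGetD_mid1 (o ++ d') r z x 0]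
    have hzx : z < x := hy z (by simp)
    rw [if_pos hzx, pvSwap]
    have hi2 : (o ++ d').length - 1 = o.length + d'.length - 1 := by simp
    rw [hi2]
    have := ih o (z :: r) f (fun y hyy => hy y (by simp [hyy]))
      (fun j hj hj2 => hc j hj (by simp at hj2 ⊢; omega))
    rw [show (o ++ d') ++ x :: z :: r = o ++ d' ++ x :: (z :: r) by simp] at this ⊢
    rw [this]
    congr 1
    simp

lemma pvGetD_right (l t : List Int) (j : Nat) (d : Int) (h : l.length ≤ j) :
    (l ++ t).getD j d = t.getD (j - l.length) d := by
  simp [List.getD, List.getElem?_append_right h]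

lemma pvGetD_mapRange (f : Nat → Int) (n k : Nat) (h : k < n) :
    ((List.range n).map f).getD k 0 = f k := by
  simp [List.getD, List.getElem?_map, List.getElem?_range, h]

lemma pvGetD_mem (l : List Int) (j : Nat) (d : Int) (h : j < l.length) :
    l.getD j d ∈ l := by
  rw [List.getD_eq_getElem l d h]
  exact List.getElem_mem h

lemma pvRevMapRange (f : Nat → Int) (n : Nat) :
    ((List.range n).map f).reverse = (List.range n).map (fun k => f (n - 1 - k)) := by
  apply List.ext_getElem
  · simp
  · intro i h1 h2
    simp at h1
    simp [List.getElem_reverse, h1]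

lemma pvTail_cons (cs : List Char) (m : Nat) (hm : m < cs.length) :
    pvTail cs m = ((m : Int) + 2) :: pvTail cs (m+1) := by
  unfold pvTail
  have h : cs.length - m = (cs.length - (m+1)) + 1 := by omega
  rw [h, List.range_succ_eq_map, List.map_cons, List.map_map]
  refine congrArg₂ List.cons ?_ (List.map_congr_left ?_)
  · omega
  · intro k _
    simp only [Function.comp_apply]
    omega

-- one pattern character: from state m to state m+1
lemma pvCharStep (cs : List Char) (m : Nat) (hm : m < cs.length) :
    ∃ c ≤ 2 * cs.length + 4, ∀ f : Nat,
      pvLoopA cs (c + f) (pvFlat (pvOutBlk cs m) ++ pvTail cs m) m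
        = pvLoopA cs f (pvFlat (pvOutBlk cs (m+1)) ++ pvTail cs (m+1)) (m+1) := by
  obtain ⟨h1, h2, h3, h4, h5, h6⟩ := pvInv cs m
  have e0 : pvOutBlk cs (m+1) = (if cs.getD m ' ' = 'I'
      then ((pvOutBlk cs m).1 ++ (pvOutBlk cs m).2.reverse, [(m:Int)+2])
      else ((pvOutBlk cs m).1, (pvOutBlk cs m).2 ++ [(m:Int)+2])) := rfl
  have htail := pvTail_cons cs m hm
  have htaillen : (pvTail cs (m+1)).length = cs.length - (m+1) := by simp [pvTail]
  have hbrev : (pvOutBlk cs m).2.reverse =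
      (List.range (pvOutBlk cs m).2.length).map (fun k => ((m + 1 - k : Nat) : Int)) := by
    conv_lhs => rw [h2, pvRevMapRange]
    apply List.map_congr_left
    intro k hk
    simp at hk
    congr 1
    omega
  have hflat : pvFlat (pvOutBlk cs m)
      = (pvOutBlk cs m).1 ++ (pvOutBlk cs m).2.reverse := rfl
  by_cases hI : cs.getD m ' ' = 'I'
  · refine ⟨1, by omega, ?_⟩
    intro f
    have hgm : (pvFlat (pvOutBlk cs m) ++ pvTail cs m).getD m 0
        = (((pvOutBlk cs m).1.length + 1 : Nat) : Int) := by
      rw [hflat, List.append_assoc,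
        pvGetD_right _ _ m 0 (by omega),
        pvGetD_left _ _ _ 0 (by simp; omega), hbrev,
        pvGetD_mapRange _ _ _ (by omega)]
      congr 1
      omega
    have hgm1 : (pvFlat (pvOutBlk cs m) ++ pvTail cs m).getD (m+1) 0 = (m : Int) + 2 := by
      rw [pvGetD_right _ _ (m+1) 0 (by simp [hflat]; omega)]
      have : m + 1 - (pvFlat (pvOutBlk cs m)).length = 0 := by simp [hflat]; omega
      rw [this, htail]
      rfl
    have hfwd := pvForward cs (pvFlat (pvOutBlk cs m) ++ pvTail cs m) 1 m f
      (by simp [hflat, pvTail]; omega)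
      (by
        intro j hj1 hj2
        have hjm : j = m := by omega
        subst hjm
        rw [if_pos hI, hgm, hgm1]
        omega)
    rw [hfwd]
    congr 1
    rw [e0, if_pos hI]
    simp only [pvFlat, htail]
    simp
  · -- bubbling then forward
    refine ⟨(pvOutBlk cs m).2.length + (m + 1 - ((pvOutBlk cs m).1.length - 1)), by omega, ?_⟩
    intro f
    have harr : pvFlat (pvOutBlk cs m) ++ pvTail cs m
        = (pvOutBlk cs m).1 ++ (pvOutBlk cs m).2.reverse
            ++ ((m:Int)+2) :: pvTail cs (m+1) := by
      rw [hflat, htail, List.append_assoc]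
    have hfuel : (pvOutBlk cs m).2.length + (m + 1 - ((pvOutBlk cs m).1.length - 1)) + f
        = (pvOutBlk cs m).2.reverse.length + ((m + 1 - ((pvOutBlk cs m).1.length - 1)) + f) := by
      simp; omega
    have him : m = (pvOutBlk cs m).1.length + (pvOutBlk cs m).2.reverse.length - 1 := by
      simp; omega
    have hbub := pvBubble cs ((m:Int)+2) ((pvOutBlk cs m).2.reverse) (pvOutBlk cs m).1
      (pvTail cs (m+1)) ((m + 1 - ((pvOutBlk cs m).1.length - 1)) + f)
      (by
        intro y hy
        rw [List.mem_reverse, h2] at hy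
        simp only [List.mem_map, List.mem_range] at hy
        obtain ⟨j, hj, rfl⟩ := hy
        have : (pvOutBlk cs m).1.length + 1 + j ≤ m + 1 := by omega
        push_cast
        omega)
      (by
        intro j hj1 hj2
        simp only [List.length_reverse] at hj2
        rcases Nat.lt_or_ge j m with h | h
        · exact h5 j hj1 h
        · have : j = m := by omega
          rw [this]
          exact hI)
    rw [← him] at hbub
    rw [harr, hfuel, hbub]
    -- forward phase over the new descending run
    have hu : ((m:Int)+2) :: (pvOutBlk cs m).2.reverse
        = (List.range ((pvOutBlk cs m).2.length + 1)).map (fun t => ((m + 2 - t : Nat) : Int)) := by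
      rw [List.range_succ_eq_map, List.map_cons, List.map_map, hbrev]
      refine congrArg₂ List.cons ?_ (List.map_congr_left ?_)
      · omega
      · intro k _
        simp only [Function.comp_apply]
        omega
    have ha1 : (pvOutBlk cs m).1 ++ ((m:Int)+2) :: ((pvOutBlk cs m).2.reverse ++ pvTail cs (m+1))
        = (pvOutBlk cs m).1 ++ ((((m:Int)+2) :: (pvOutBlk cs m).2.reverse) ++ pvTail cs (m+1)) := by
      simp
    have hplen : (pvOutBlk cs m).1.length - 1 + (m + 1 - ((pvOutBlk cs m).1.length - 1)) = m + 1 := by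
      omega
    have hfwd := pvForward cs
      ((pvOutBlk cs m).1 ++ ((m:Int)+2) :: ((pvOutBlk cs m).2.reverse ++ pvTail cs (m+1)))
      (m + 1 - ((pvOutBlk cs m).1.length - 1)) ((pvOutBlk cs m).1.length - 1) f
      (by simp [htaillen]; omega)
      (by
        intro j hj1 hj2
        rw [hplen] at hj2
        by_cases hjp : j < (pvOutBlk cs m).1.length
        · -- j = p - 1, the 'I' position guarding the block
          have hp1 : 1 ≤ (pvOutBlk cs m).1.length := by omega
          have hjeq : j = (pvOutBlk cs m).1.length - 1 := by omega
          rw [hjeq, if_pos (h6 hp1)]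
          have hg1 : ((pvOutBlk cs m).1 ++ ((m:Int)+2) :: ((pvOutBlk cs m).2.reverse ++ pvTail cs (m+1))).getD
              ((pvOutBlk cs m).1.length - 1) 0 = (pvOutBlk cs m).1.getD ((pvOutBlk cs m).1.length - 1) 0 := by
            exact pvGetD_left _ _ _ 0 (by omega)
          have hg2 : ((pvOutBlk cs m).1 ++ ((m:Int)+2) :: ((pvOutBlk cs m).2.reverse ++ pvTail cs (m+1))).getD
              ((pvOutBlk cs m).1.length - 1 + 1) 0 = (m:Int)+2 := by
            have : (pvOutBlk cs m).1.length - 1 + 1 = (pvOutBlk cs m).1.length := by omega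
            rw [this]
            exact pvGetD_mid _ _ _ 0
          rw [hg1, hg2]
          have hmem := pvGetD_mem (pvOutBlk cs m).1 ((pvOutBlk cs m).1.length - 1) 0 (by omega)
          have := h4 _ hmem
          omega
        · -- inside the descending run
          have hcj : ¬ cs.getD j ' ' = 'I' := by
            rcases Nat.lt_or_ge j m with h | h
            · exact h5 j (by omega) h
            · have : j = m := by omega
              rw [this]; exact hI
          rw [if_neg hcj, ha1]
          have hg1 := pvGetD_right (pvOutBlk cs m).1
            ((((m:Int)+2) :: (pvOutBlk cs m).2.reverse) ++ pvTail cs (m+1)) j 0 (by omega)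
          have hg2 := pvGetD_right (pvOutBlk cs m).1
            ((((m:Int)+2) :: (pvOutBlk cs m).2.reverse) ++ pvTail cs (m+1)) (j+1) 0 (by omega)
          rw [hg1, hg2,
            pvGetD_left _ _ _ 0 (by simp; omega),
            pvGetD_left _ _ _ 0 (by simp; omega), hu,
            pvGetD_mapRange _ _ _ (by omega),
            pvGetD_mapRange _ _ _ (by omega)]
          have hj1' : j - (pvOutBlk cs m).1.length + 1 = j + 1 - (pvOutBlk cs m).1.length := by omega
          push_cast
          omega)
    rw [hplen] at hfwd
    rw [hfwd]
    congr 1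
    rw [e0, if_neg hI]
    simp only [pvFlat]
    simp

lemma pvMain (cs : List Char) :
    ∀ (q m : Nat), q = cs.length - m → m ≤ cs.length →
    ∃ c ≤ q * (2 * cs.length + 4), ∀ f : Nat,
      pvLoopA cs (c + f) (pvFlat (pvOutBlk cs m) ++ pvTail cs m) m
        = pvLoopA cs f (pvFlat (pvOutBlk cs cs.length)) cs.length := by
  intro q
  induction q with
  | zero =>
    intro m hq hm
    have hme : m = cs.length := by omega
    subst hme
    refine ⟨0, by omega, ?_⟩
    intro f
    have ht : pvTail cs cs.length = [] := by simp [pvTail]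
    rw [ht, List.append_nil]
    simp
  | succ q ih =>
    intro m hq hm
    have hmlt : m < cs.length := by omega
    obtain ⟨c1, hc1, hstep⟩ := pvCharStep cs m hmlt
    obtain ⟨c2, hc2, hrest⟩ := ih (m+1) (by omega) (by omega)
    have hb : (q+1) * (2*cs.length+4) = q * (2*cs.length+4) + (2*cs.length+4) := by ring
    refine ⟨c1 + c2, by omega, ?_⟩
    intro f
    have hf : c1 + c2 + f = c1 + (c2 + f) := by omega
    rw [hf, hstep, hrest]

-- ===== VERDICT (by name: the statement is the Claim_ definition above) =====
theorem printMinNumberForPattern_spec : Claim_equal_printMinNumberForPattern := by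
  unfold Claim_equal_printMinNumberForPattern
  intro S _
  unfold Spec_printMinNumberForPattern
  by_cases hSI : S = "I"
  · subst hSI; decide
  by_cases hSD : S = "D"
  · subst hSD; decide
  have hA : printMinNumberForPattern S
      = PySem.Str.join "" ((pvLoopA S.toList ((S.toList.length+2)*(2*S.toList.length+4))
          ((List.range (S.toList.length+1)).map (fun i => ((i + 1 : Nat) : Int))) 0).map PySem.Int.toStr) := by
    unfold printMinNumberForPattern
    rw [if_neg hSI, if_neg hSD]
  have hinit : (List.range (S.toList.length+1)).map (fun i => ((i + 1 : Nat) : Int))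
      = pvFlat (pvOutBlk S.toList 0) ++ pvTail S.toList 0 := by
    have hr : pvFlat (pvOutBlk S.toList 0) ++ pvTail S.toList 0
        = (1 : Int) :: pvTail S.toList 0 := rfl
    rw [hr, List.range_succ_eq_map, List.map_cons, List.map_map]
    refine congrArg₂ List.cons (by norm_num) ?_
    unfold pvTail
    rw [Nat.sub_zero]
    apply List.map_congr_left
    intro k _
    simp only [Function.comp_apply]
    omega
  obtain ⟨c, hc, hrun⟩ := pvMain S.toList S.toList.length 0 (by omega) (by omega)
  have hcF : c ≤ (S.toList.length+2)*(2*S.toList.length+4) := by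
    have h2 : S.toList.length * (2*S.toList.length+4)
        ≤ (S.toList.length+2) * (2*S.toList.length+4) :=
      Nat.mul_le_mul_right _ (by omega)
    omega
  have hF : (S.toList.length+2)*(2*S.toList.length+4)
      = c + ((S.toList.length+2)*(2*S.toList.length+4) - c) := by omega
  have hkey : pvLoopA S.toList ((S.toList.length+2)*(2*S.toList.length+4))
      ((List.range (S.toList.length+1)).map (fun i => ((i + 1 : Nat) : Int))) 0
      = pvFlat (pvOutBlk S.toList S.toList.length) := by
    rw [hinit, hF, hrun]
    apply pvLoopA_done
    have h1 := (pvInv S.toList S.toList.length).1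
    simp only [pvFlat, List.length_append, List.length_reverse]
    omega
  rw [hA, hkey, pvAltEq]
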